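-- pv_equiv track=rewrite | github.com/s-b-repo/FBI-NET | openssh.py | extract_run_section
-- ===== SOURCE A (Python) =====
-- def extract_run_section(readme):
--     lines = readme.splitlines()
--     run_index = [i for i, l in enumerate(lines) if l.strip().lower() == "### run"]
--     if not run_index:
--         return []
--     start = run_index[0] + 1
--     result = []
--     for line in lines[start:]:
--         if line.strip().startswith("### "):  # Next section
--             break
--         if line.strip():
--             result.append(line.strip())
--     return result
-- ===== SOURCE B (Python) =====
-- def extract_run_section(readme):
--     result = []
--     in_section = False
--     for line in readme.splitlines():
--         s = line.strip()
--         if in_section: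
--             if s.startswith("### "):
--                 break
--             if s:
--                 result.append(s)
--         elif s.lower() == "### run":
--             in_section = True
--     return result
-- ===== Notes on version B (the rewrite author's own statement) =====
-- stated objective: simpler
-- what changed: Single pass with an in_section flag replaces A's two passes (enumerate-filter to locate the header index, then a slice-and-scan loop).
import Mathlib
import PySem

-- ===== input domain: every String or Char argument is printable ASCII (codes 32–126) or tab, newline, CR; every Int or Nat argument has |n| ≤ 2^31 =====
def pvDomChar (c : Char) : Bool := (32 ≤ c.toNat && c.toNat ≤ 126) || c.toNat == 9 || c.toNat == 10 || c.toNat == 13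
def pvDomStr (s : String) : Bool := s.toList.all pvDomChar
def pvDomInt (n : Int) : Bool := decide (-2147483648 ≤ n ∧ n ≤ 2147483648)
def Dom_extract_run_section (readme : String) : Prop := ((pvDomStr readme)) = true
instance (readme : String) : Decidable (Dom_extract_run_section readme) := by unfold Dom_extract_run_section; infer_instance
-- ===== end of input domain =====

-- B replaces A's two passes (index hunt, then slice-and-scan) by one flagged pass; objective: simpler.

-- ===== PORT A =====
def pvALoop : List String → List String → List String
  | [], result => result
  | line :: rest, result =>
    if PySem.Str.startswith (PySem.Str.strip line) "### " then result
    else if PySem.Str.strip line ≠ "" then pvALoop rest (result ++ [PySem.Str.strip line])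
    else pvALoop rest result

def extract_run_section (readme : String) : List String :=
  let lines := PySem.Str.splitlines readme
  let run_index := ((PySem.List.enumerate lines 0).filter
      (fun p => PySem.Str.lower (PySem.Str.strip p.2) == "### run")).map (·.1)
  match run_index with
  | [] => []
  | i :: _ =>
    let start := i + 1
    pvALoop (PySem.List.slice lines (some start) none) []

-- ===== PORT B =====
def pvBLoop : List String → Bool → List String → List String
  | [], _, result => result
  | line :: rest, inSection, result =>
    let s := PySem.Str.strip line
    if inSection then
      if PySem.Str.startswith s "### " then result
      else if s ≠ "" then pvBLoop rest true (result ++ [s])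
      else pvBLoop rest true result
    else if PySem.Str.lower s == "### run" then pvBLoop rest true result
    else pvBLoop rest false result

def extract_run_section_alt (readme : String) : List String :=
  pvBLoop (PySem.Str.splitlines readme) false []

-- ===== PRECONDITION & SPEC =====
def Spec_extract_run_section (readme : String) (out : List String) : Prop := out = extract_run_section_alt readme
instance (readme : String) (out : List String) : Decidable (Spec_extract_run_section readme out) := by unfold Spec_extract_run_section; infer_instance

-- ===== CLAIM (what is proved, stated in full; the proofs are below) =====
def Claim_equal_extract_run_section : Prop := ∀ (readme : String), Dom_extract_run_section readme → Spec_extract_run_section readme (extract_run_section readme)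

-- ===== LEMMAS AND PROOFS =====

def pvIsHdr (l : String) : Bool := PySem.Str.lower (PySem.Str.strip l) == "### run"

-- first element of A's run_index list, as a findIdx?
theorem pvEnumFilterHead (xs : List String) (s : Nat) :
    ((((PySem.List.enumerate xs (s : Int)).filter (fun p => pvIsHdr p.2)).map (·.1)).head?)
      = (xs.findIdx? pvIsHdr).map (fun k => ((s + k : Nat) : Int)) := by
  induction xs generalizing s with
  | nil => simp [PySem.List.enumerate_nil]
  | cons x xs ih =>
    rw [PySem.List.enumerate_cons]
    by_cases hx : pvIsHdr x
    · simp [hx, List.findIdx?_cons]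
    · have : ((s : Int) + 1) = ((s + 1 : Nat) : Int) := by push_cast; ring
      simp only [List.filter_cons, hx, Bool.false_eq_true, if_false, this,
        List.findIdx?_cons, ih (s + 1)]
      cases xs.findIdx? pvIsHdr <;> simp <;> omega

theorem pvBLoop_true (xs : List String) (acc : List String) :
    pvBLoop xs true acc = pvALoop xs acc := by
  induction xs generalizing acc with
  | nil => rfl
  | cons l rest ih =>
    simp only [pvBLoop, pvALoop]
    split_ifs <;> simp [ih]

theorem pvBLoop_false (xs : List String) :
    pvBLoop xs false [] =
      (match xs.findIdx? pvIsHdr with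
       | none => []
       | some k => pvALoop (xs.drop (k + 1)) []) := by
  induction xs with
  | nil => rfl
  | cons l rest ih =>
    by_cases hl : pvIsHdr l
    · have hl' : (PySem.Str.lower (PySem.Str.strip l) == "### run") = true := hl
      simp [pvBLoop, hl', List.findIdx?_cons, hl, pvBLoop_true]
    · have hl' : (PySem.Str.lower (PySem.Str.strip l) == "### run") = false := by
        simpa [pvIsHdr] using hl
      rw [show pvBLoop (l :: rest) false [] = pvBLoop rest false [] by
        simp [pvBLoop, hl']]
      rw [ih, List.findIdx?_cons]
      simp only [hl, Bool.false_eq_true, if_false]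
      cases rest.findIdx? pvIsHdr <;> simp

-- ===== VERDICT (by name: the statement is the Claim_ definition above) =====
theorem extract_run_section_spec : Claim_equal_extract_run_section := by
  intro readme _
  unfold Spec_extract_run_section extract_run_section extract_run_section_alt
  set lines := PySem.Str.splitlines readme with hlines
  rw [pvBLoop_false]
  have h := pvEnumFilterHead lines 0
  simp only [Nat.cast_zero, Nat.zero_add] at h
  cases hfi : lines.findIdx? pvIsHdr with
  | none =>
    rw [hfi] at h
    simp only [Option.map_none] at h
    have : ((PySem.List.enumerate lines 0).filter (fun p => pvIsHdr p.2)).map (·.1) = [] := by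
      cases hL : ((PySem.List.enumerate lines 0).filter (fun p => pvIsHdr p.2)).map (·.1) with
      | nil => rfl
      | cons a t => rw [hL] at h; simp at h
    simp only [pvIsHdr] at this
    simp [this]
  | some k =>
    rw [hfi] at h
    cases hL : ((PySem.List.enumerate lines 0).filter (fun p => pvIsHdr p.2)).map (·.1) with
    | nil => rw [hL] at h; simp at h
    | cons i t =>
      rw [hL] at h
      simp only [List.head?_cons, Option.map_some] at h
      have hi : i = ((k : Nat) : Int) := by
        have := h.symm
        simp at this
        omega
      have hL' := hL
      simp only [pvIsHdr] at hL'
      simp only [hL']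
      rw [hi]
      have : PySem.List.slice lines (some (((k : Nat) : Int) + 1)) none = lines.drop (k + 1) := by
        have : (((k : Nat) : Int) + 1) = ((k + 1 : Nat) : Int) := by push_cast; ring
        rw [this, PySem.List.slice_from_natCast]
      rw [this]
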